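-- pv_equiv track=rewrite | github.com/EUCANCan/prepy-wrapper | src/prepy-wrapper.py | _add_chr_to_alt_field
-- ===== SOURCE A (Python) =====
-- def _add_chr_to_alt_field(alt_field):
--     # Check if alt_field uses brackets
--     if ':' not in alt_field:
--         return alt_field
--     # Check if alt_field is a single alt or multiple alts
--     if ',' in alt_field:
--         return ','.join(_add_chr_to_alt_field(alt) for alt in alt_field.split(','))
--     start, end = alt_field.split(':')
--     bracket = '[' if '[' in start else ']'
--     if bracket == '[':
--         prefix, chrom = start.split('[')
--     else:  # Assume ]
--         prefix, chrom = start.split(']')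
--     chr_chrom = 'chr' + chrom
--     return prefix + bracket + chr_chrom + ':' + end
-- ===== SOURCE B (Python) =====
-- def _add_chr_to_alt_field(alt_field):
--     if ':' not in alt_field:
--         return alt_field
--     out = []
--     for part in alt_field.split(','):
--         if ':' not in part:
--             out.append(part)
--             continue
--         start, end = part.split(':')
--         bracket = '[' if '[' in start else ']'
--         prefix, chrom = start.split(bracket)
--         out.append(prefix + bracket + 'chr' + chrom + ':' + end)
--     return ','.join(out)
-- ===== Notes on version B (the rewrite author's own statement) =====
-- stated objective: alternative
-- what changed: Replaces A's self-recursion over the comma-split (a join of a recursive comprehension) by a single flat loop with an accumulator list that rewrites each part in place, splitting on the chosen bracket variable once instead of A's per-bracket branches.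
import Mathlib
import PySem

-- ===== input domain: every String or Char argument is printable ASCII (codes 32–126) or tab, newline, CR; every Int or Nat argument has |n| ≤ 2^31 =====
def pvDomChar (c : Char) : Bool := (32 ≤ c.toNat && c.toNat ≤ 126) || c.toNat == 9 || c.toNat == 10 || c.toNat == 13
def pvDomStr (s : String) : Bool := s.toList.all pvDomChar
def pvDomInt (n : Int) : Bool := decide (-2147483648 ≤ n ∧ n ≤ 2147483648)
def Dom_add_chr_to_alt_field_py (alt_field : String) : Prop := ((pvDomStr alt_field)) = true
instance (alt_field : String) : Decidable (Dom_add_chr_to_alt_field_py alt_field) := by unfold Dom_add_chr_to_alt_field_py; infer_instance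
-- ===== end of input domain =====

-- B replaces A's self-recursion over the comma-split by one flat accumulator loop that
-- rewrites each part, splitting on the chosen bracket once (objective: alternative).

-- ===== PORT A =====
-- reference split used only to reason about PySem.Chars.splitOn and for A's termination
def pvSplit (c : Char) : List Char → List Char → List (List Char)
  | [], cur => [cur.reverse]
  | a :: rest, cur =>
      if a = c then cur.reverse :: pvSplit c rest []
      else pvSplit c rest (a :: cur)

theorem pvSplit_go (c : Char) : ∀ (fuel : Nat) (l cur : List Char) (acc : List (List Char)),
    l.length < fuel →
    PySem.Chars.splitOn.go [c] fuel l cur acc = acc.reverse ++ pvSplit c l cur := by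
  intro fuel
  induction fuel with
  | zero => intro l cur acc h; omega
  | succ n ih =>
    intro l cur acc h
    match l with
    | [] => simp [PySem.Chars.splitOn.go, pvSplit]
    | a :: rest =>
      rw [PySem.Chars.splitOn.go]
      by_cases hac : a = c
      · subst hac
        have hpr : ([a].isPrefixOf (a :: rest)) = true := by simp [List.isPrefixOf]
        rw [hpr]
        simp only [if_true, List.length_cons, List.length_nil, List.drop_succ_cons, List.drop_zero]
        rw [ih rest [] (cur.reverse :: acc) (by simpa using Nat.lt_of_succ_lt_succ h)]
        simp [pvSplit]
      · have : ([c].isPrefixOf (a :: rest)) = false := by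
          simp [List.isPrefixOf]
          exact fun hh => (hac hh.symm).elim
        rw [this]
        simp only [Bool.false_eq_true, if_false]
        rw [ih rest (a :: cur) acc (by simpa using Nat.lt_of_succ_lt_succ h)]
        simp [pvSplit, hac]

theorem splitOn_eq_pvSplit (c : Char) (s : List Char) :
    PySem.Chars.splitOn s [c] = pvSplit c s [] := by
  unfold PySem.Chars.splitOn
  rw [pvSplit_go c (s.length + 1) s [] [] (by omega)]
  simp

theorem pvSplit_length_le (c : Char) : ∀ (l cur p : List Char),
    p ∈ pvSplit c l cur → p.length ≤ cur.length + l.length := by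
  intro l
  induction l with
  | nil => intro cur p hp; simp [pvSplit] at hp; simp [hp]
  | cons a rest ih =>
    intro cur p hp
    simp only [pvSplit] at hp
    by_cases hac : a = c
    · rw [if_pos hac] at hp
      rcases List.mem_cons.mp hp with h | h
      · have : p.length = cur.length := by simp [h]
        simp only [List.length_cons]; omega
      · have := ih [] p h; simp at this; simp; omega
    · rw [if_neg hac] at hp
      have := ih (a :: cur) p hp; simp at this; simp; omega

theorem pvSplit_length_lt (c : Char) : ∀ (l cur p : List Char), c ∈ l →
    p ∈ pvSplit c l cur → p.length < cur.length + l.length := by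
  intro l
  induction l with
  | nil => intro cur p hc; simp at hc
  | cons a rest ih =>
    intro cur p hc hp
    simp only [pvSplit] at hp
    by_cases hac : a = c
    · rw [if_pos hac] at hp
      rcases List.mem_cons.mp hp with h | h
      · have : p.length = cur.length := by simp [h]
        simp only [List.length_cons]; omega
      · have := pvSplit_length_le c rest [] p h; simp at this; simp; omega
    · rw [if_neg hac] at hp
      have hcr : c ∈ rest := by
        rcases List.mem_cons.mp hc with h | h
        · exact absurd h.symm hac
        · exact h
      have := ih (a :: cur) p hcr hp; simp at this; simp; omega

theorem pv_singleton_infix_iff (c : Char) (l : List Char) : [c] <:+: l ↔ c ∈ l := by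
  constructor
  · rintro ⟨s, t, rfl⟩; simp
  · intro h
    rcases List.append_of_mem h with ⟨a, b, rfl⟩
    exact ⟨a, b, by simp⟩

theorem pv_isIn_iff_mem (c : Char) (s : List Char) :
    PySem.Chars.isIn [c] s = true ↔ c ∈ s := by
  rw [PySem.Chars.isIn_iff_infix, pv_singleton_infix_iff]

theorem pv_part_len_lt (c : Char) (s p : List Char)
    (hc : PySem.Chars.isIn [c] s = true) (hp : p ∈ PySem.Chars.splitOn s [c]) :
    p.length < s.length := by
  rw [splitOn_eq_pvSplit] at hp
  have := pvSplit_length_lt c s [] p ((pv_isIn_iff_mem c s).mp hc) hp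
  simpa using this

-- port of A: the recursive function, step for step
def pvAimpl (s : List Char) : List Char :=
  if PySem.Chars.isIn [':'] s = false then s
  else if PySem.Chars.isIn [','] s = true then
    PySem.Chars.join [','] ((PySem.Chars.splitOn s [',']).attach.map (fun x => pvAimpl x.1))
  else
    match PySem.Chars.splitOn s [':'] with
    | [st, en] =>
        let bracket := if PySem.Chars.isIn ['['] st = true then '[' else ']'
        if bracket = '[' then
          match PySem.Chars.splitOn st ['['] with
          | [pre, chrom] =>
              let chr_chrom := 'c' :: 'h' :: 'r' :: chrom
              pre ++ [bracket] ++ chr_chrom ++ [':'] ++ en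
          | _ => []   -- Python raises ValueError here (excluded by Pre_)
        else
          match PySem.Chars.splitOn st [']'] with
          | [pre, chrom] =>
              let chr_chrom := 'c' :: 'h' :: 'r' :: chrom
              pre ++ [bracket] ++ chr_chrom ++ [':'] ++ en
          | _ => []   -- Python raises ValueError here (excluded by Pre_)
    | _ => []       -- Python raises ValueError here (excluded by Pre_)
termination_by s.length
decreasing_by
  exact pv_part_len_lt ',' s x.1 (by assumption) x.2

def add_chr_to_alt_field_py (alt_field : String) : String :=
  String.mk (pvAimpl alt_field.toList)

-- ===== PORT B =====
-- the loop body of B: rewrite one comma-part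
def pvBpart (p : List Char) : List Char :=
  if PySem.Chars.isIn [':'] p = false then p
  else
    match PySem.Chars.splitOn p [':'] with
    | [st, en] =>
        let bracket := if PySem.Chars.isIn ['['] st = true then '[' else ']'
        match PySem.Chars.splitOn st [bracket] with
        | [pre, chrom] => pre ++ [bracket] ++ ['c', 'h', 'r'] ++ chrom ++ [':'] ++ en
        | _ => []   -- Python raises ValueError here (excluded by Pre_)
    | _ => []       -- Python raises ValueError here (excluded by Pre_)

def pvBimpl (s : List Char) : List Char :=
  if PySem.Chars.isIn [':'] s = false then s
  else
    -- the for-loop over the comma-split, accumulating `out` (built reversed, as a foldl)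
    PySem.Chars.join [',']
      (((PySem.Chars.splitOn s [',']).foldl (fun acc p => pvBpart p :: acc) []).reverse)

def add_chr_to_alt_field_py_alt (alt_field : String) : String :=
  String.mk (pvBimpl alt_field.toList)

-- ===== PRECONDITION & SPEC =====
-- Pre_ excludes exactly the inputs on which A raises ValueError (tuple unpacking of a split):
-- a comma-part containing ':' must have exactly one ':' and its pre-colon prefix exactly one '['
-- (or, when it has no '[', exactly one ']'). B raises there too.
def Pre_add_chr_to_alt_field_py (alt_field : String) : Prop :=
  ∀ p ∈ PySem.Chars.splitOn alt_field.toList [','],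
    ':' ∈ p →
      p.count ':' = 1 ∧
      ((p.takeWhile (fun x => x != ':')).count '[' = 1 ∨
        ((p.takeWhile (fun x => x != ':')).count '[' = 0 ∧
         (p.takeWhile (fun x => x != ':')).count ']' = 1))
instance (alt_field : String) : Decidable (Pre_add_chr_to_alt_field_py alt_field) := by
  unfold Pre_add_chr_to_alt_field_py; infer_instance

def pvWitness_add_chr_to_alt_field_py : String := "T[1:5["

def Spec_add_chr_to_alt_field_py (alt_field : String) (out : String) : Prop :=
  out = add_chr_to_alt_field_py_alt alt_field
instance (alt_field : String) (out : String) : Decidable (Spec_add_chr_to_alt_field_py alt_field out) := by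
  unfold Spec_add_chr_to_alt_field_py; infer_instance

-- ===== CLAIM (what is proved, stated in full; the proofs are below) =====
def Claim_equal_add_chr_to_alt_field_py : Prop :=
  ∀ (alt_field : String), Dom_add_chr_to_alt_field_py alt_field →
    Pre_add_chr_to_alt_field_py alt_field →
    Spec_add_chr_to_alt_field_py alt_field (add_chr_to_alt_field_py alt_field)

-- ===== LEMMAS AND PROOFS =====

theorem pvSplit_no_sep (c : Char) : ∀ (l cur p : List Char), c ∉ cur →
    p ∈ pvSplit c l cur → c ∉ p := by
  intro l
  induction l with
  | nil =>
    intro cur p hcur hp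
    simp [pvSplit] at hp; subst hp; simpa using hcur
  | cons a rest ih =>
    intro cur p hcur hp
    simp only [pvSplit] at hp
    by_cases hac : a = c
    · rw [if_pos hac] at hp
      rcases List.mem_cons.mp hp with h | h
      · subst h; simpa using hcur
      · exact ih [] p (by simp) h
    · rw [if_neg hac] at hp
      exact ih (a :: cur) p (by simp [hcur]; exact fun h => hac h.symm) hp

theorem pvSplit_not_mem (c : Char) : ∀ (l cur : List Char), c ∉ l →
    pvSplit c l cur = [cur.reverse ++ l] := by
  intro l
  induction l with
  | nil => intro cur h; simp [pvSplit]
  | cons a rest ih =>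
    intro cur h
    simp only [pvSplit]
    have hac : a ≠ c := fun hh => h (by simp [hh])
    rw [if_neg hac, ih (a :: cur) (fun hh => h (by simp [hh]))]
    simp

theorem pv_isIn_eq_false (c : Char) (l : List Char) (h : c ∉ l) :
    PySem.Chars.isIn [c] l = false := by
  cases hh : PySem.Chars.isIn [c] l
  · rfl
  · exact absurd ((pv_isIn_iff_mem c l).mp hh) h

-- B's foldl-with-cons then reverse is a map
theorem pv_foldl_rev_map {α β : Type} (f : α → β) :
    ∀ (l : List α) (acc : List β),
      (l.foldl (fun acc p => f p :: acc) acc).reverse = acc.reverse ++ l.map f := by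
  intro l
  induction l with
  | nil => intro acc; simp
  | cons a rest ih => intro acc; simp [List.foldl_cons]

-- per comma-part, A's recursive call computes exactly B's loop body
theorem pv_part_eq (p : List Char) (hcomma : ',' ∉ p) : pvAimpl p = pvBpart p := by
  by_cases hc : PySem.Chars.isIn [':'] p = false
  · rw [pvAimpl, if_pos hc, pvBpart, if_pos hc]
  · rw [pvAimpl, if_neg hc, if_neg (by simp [pv_isIn_eq_false ',' p hcomma]),
      pvBpart, if_neg hc]
    rcases hsp : PySem.Chars.splitOn p [':'] with _ | ⟨st, _ | ⟨en, _ | _⟩⟩ <;> try rfl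
    by_cases hb : PySem.Chars.isIn ['['] st = true
    · simp only [hb, if_true]
      rcases PySem.Chars.splitOn st ['['] with _ | ⟨pre, _ | ⟨chrom, _ | _⟩⟩ <;> simp
    · simp only [hb, Bool.false_eq_true, if_false]
      rw [if_neg (by decide)]
      rcases PySem.Chars.splitOn st [']'] with _ | ⟨pre, _ | ⟨chrom, _ | _⟩⟩ <;> simp

theorem pv_main (s : List Char) : pvAimpl s = pvBimpl s := by
  by_cases hc : PySem.Chars.isIn [':'] s = false
  · rw [pvAimpl, if_pos hc, pvBimpl, if_pos hc]
  · rw [pvBimpl, if_neg hc, pv_foldl_rev_map]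
    simp only [List.reverse_nil, List.nil_append]
    by_cases hm : PySem.Chars.isIn [','] s = true
    · rw [pvAimpl, if_neg hc, if_pos hm]
      congr 1
      have hattach : ((PySem.Chars.splitOn s [',']).attach.map (fun x => pvAimpl x.1))
          = (PySem.Chars.splitOn s [',']).map pvAimpl := by simp
      rw [hattach]
      apply List.map_congr_left
      intro p hp
      exact pv_part_eq p
        (pvSplit_no_sep ',' s [] p (List.not_mem_nil) (by rwa [splitOn_eq_pvSplit] at hp))
    · have hm' : ',' ∉ s := fun h => hm ((pv_isIn_iff_mem ',' s).mpr h)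
      rw [splitOn_eq_pvSplit, pvSplit_not_mem ',' s [] hm']
      simp only [List.reverse_nil, List.nil_append, List.map_cons, List.map_nil,
        PySem.Chars.join_singleton]
      exact pv_part_eq s hm'

-- ===== VERDICT (by name: the statement is the Claim_ definition above) =====
theorem add_chr_to_alt_field_py_spec : Claim_equal_add_chr_to_alt_field_py := by
  intro alt_field _ _
  unfold Spec_add_chr_to_alt_field_py add_chr_to_alt_field_py add_chr_to_alt_field_py_alt
  exact congrArg String.mk (pv_main alt_field.toList)
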